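-- pv_equiv track=rewrite | github.com/karldickman/des | desl.py | reorder_integer
-- ===== SOURCE A (Python) =====
-- def reorder_integer(integer, ordering, num_bits=None):
--     if num_bits is None:
--         num_bits = len(ordering)
--     new_integer = 0
--     for i, bitmask in enumerate(ordering):
--         if integer & bitmask:
--             new_integer ^= (1 << len(ordering) - i - 1)
--     return new_integer
-- ===== SOURCE B (Python) =====
-- def reorder_integer(integer, ordering, num_bits=None):
--     bits = ''.join('1' if integer & bitmask else '0' for bitmask in ordering)
--     return int('0' + bits, 2)
-- ===== Notes on version B (the rewrite author's own statement) =====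
-- stated objective: faster
-- what changed: Instead of A's loop XORing index-computed powers of two into a growing big integer, B first renders the selected bits as a binary digit string in one pass and then converts it with a single int(s, 2) parse ('0' prepended so the empty ordering parses to 0); this replaces n big-integer shift/xor operations with one linear base-2 conversion.
import Mathlib
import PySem

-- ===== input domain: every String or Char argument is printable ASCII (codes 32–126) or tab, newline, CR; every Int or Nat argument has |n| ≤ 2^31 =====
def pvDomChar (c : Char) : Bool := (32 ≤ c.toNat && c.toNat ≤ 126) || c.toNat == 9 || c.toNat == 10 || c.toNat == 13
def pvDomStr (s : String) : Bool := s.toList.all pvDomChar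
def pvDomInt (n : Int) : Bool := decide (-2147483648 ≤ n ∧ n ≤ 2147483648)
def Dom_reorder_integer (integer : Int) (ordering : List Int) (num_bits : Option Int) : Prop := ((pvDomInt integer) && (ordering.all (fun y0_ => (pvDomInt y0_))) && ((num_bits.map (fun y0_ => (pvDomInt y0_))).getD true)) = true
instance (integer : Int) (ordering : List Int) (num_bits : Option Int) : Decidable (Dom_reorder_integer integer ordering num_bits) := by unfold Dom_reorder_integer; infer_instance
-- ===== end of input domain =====

-- B renders the selected bits as a binary digit string and converts it with one
-- int(s, 2) parse instead of A's per-bit XOR of index-computed powers of two (faster).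
-- ===== PORT A =====
-- the loop 'for i, bitmask in enumerate(ordering)' with its running index i and accumulator
-- new_integer; 'len(ordering) - i - 1' is Nat subtraction, exact here since i < n on every
-- executed step; '1 << k' is '(1 : Int) <<< k'; truthiness of 'integer & bitmask' is '≠ 0'
def reorderLoopA (integer : Int) (n : Nat) : List Int → Nat → Int → Int
  | [], _, acc => acc
  | bitmask :: rest, i, acc =>
      reorderLoopA integer n rest (i + 1)
        (if PySem.Int.band integer bitmask ≠ 0 then PySem.Int.bxor acc ((1 : Int) <<< (n - i - 1)) else acc)

def reorder_integer (integer : Int) (ordering : List Int) (num_bits : Option Int) : Int :=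
  -- 'if num_bits is None: num_bits = len(ordering)': num_bits is never read afterwards
  let _num_bits : Int := match num_bits with | none => (ordering.length : Int) | some k => k
  reorderLoopA integer ordering.length ordering 0 0

-- ===== PORT B =====
-- int(s, 2) has no PySem primitive; ported by hand as the base-2 digit fold,
-- exact here because every character of the argument is '0' or '1'
def pvIntOfBin (s : List Char) : Int :=
  s.foldl (fun acc c => 2 * acc + (if c = '1' then 1 else 0)) 0

def reorder_integer_alt (integer : Int) (ordering : List Int) (num_bits : Option Int) : Int :=
  -- bits = ''.join('1' if integer & bitmask else '0' for bitmask in ordering)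
  let bits : List Char := ordering.map (fun bitmask => if PySem.Int.band integer bitmask ≠ 0 then '1' else '0')
  -- return int('0' + bits, 2)
  pvIntOfBin ('0' :: bits)

-- ===== PRECONDITION & SPEC =====
def Spec_reorder_integer (integer : Int) (ordering : List Int) (num_bits : Option Int) (out : Int) : Prop := out = reorder_integer_alt integer ordering num_bits
instance (integer : Int) (ordering : List Int) (num_bits : Option Int) (out : Int) : Decidable (Spec_reorder_integer integer ordering num_bits out) := by unfold Spec_reorder_integer; infer_instance

-- ===== CLAIM (what is proved, stated in full; the proofs are below) =====
def Claim_equal_reorder_integer : Prop := ∀ (integer : Int) (ordering : List Int) (num_bits : Option Int), Dom_reorder_integer integer ordering num_bits → Spec_reorder_integer integer ordering num_bits (reorder_integer integer ordering num_bits)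

-- ===== LEMMAS AND PROOFS =====

-- 2m ^^^ 2n = 2(m ^^^ n)
theorem pvTwoMulXor (m n : Nat) : (2 * m) ^^^ (2 * n) = 2 * (m ^^^ n) := by
  simpa [Nat.bit] using Nat.xor_bit false m false n

-- XOR of a fresh lower bit into a multiple of 2^(k+1) is addition
theorem pvXorLowBit (b k : Nat) : (b * 2 ^ (k + 1)) ^^^ 2 ^ k = b * 2 ^ (k + 1) + 2 ^ k := by
  induction k generalizing b with
  | zero =>
      simpa [pow_succ] using Nat.xor_one_of_even (⟨b, by omega⟩ : Even (b * 2))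
  | succ k ih =>
      have h : b * 2 ^ (k + 2) ^^^ 2 ^ (k + 1) = 2 * ((b * 2 ^ (k + 1)) ^^^ 2 ^ k) := by
        rw [← pvTwoMulXor]; congr 1 <;> ring
      rw [h, ih]; ring

theorem pvShiftPow (k : Nat) : ((1 : Int) <<< k) = ((2 ^ k : Nat) : Int) := by
  simp [Int.shiftLeft_eq]

-- loop invariant: A's xor loop from accumulator b·2^(remaining) equals the MSB-first digit fold from b
theorem pvLoop (integer : Int) (l : List Int) : ∀ (i b : Nat),
    reorderLoopA integer (i + l.length) l i ((b * 2 ^ l.length : Nat)) =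
      l.foldl (fun result bitmask =>
        2 * result + (if PySem.Int.band integer bitmask ≠ 0 then 1 else 0)) ((b : Nat) : Int) := by
  induction l with
  | nil => intro i b; simp [reorderLoopA]
  | cons m rest ih =>
      intro i b
      have hn : i + (m :: rest).length - i - 1 = rest.length := by simp only [List.length_cons]; omega
      have harr : i + (m :: rest).length = (i + 1) + rest.length := by simp only [List.length_cons]; omega
      simp only [reorderLoopA, List.foldl_cons, hn]
      by_cases hbit : PySem.Int.band integer m ≠ 0
      · have hx : PySem.Int.bxor ((b * 2 ^ (m :: rest).length : Nat)) ((1 : Int) <<< rest.length) =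
            (((2 * b + 1) * 2 ^ rest.length : Nat) : Int) := by
          rw [pvShiftPow, PySem.Int.bxor_natCast]
          congr 1
          have h1 : b * 2 ^ (m :: rest).length = b * 2 ^ (rest.length + 1) := by simp
          rw [h1, pvXorLowBit]; ring
        rw [if_pos hbit, hx, harr, ih (i + 1) (2 * b + 1)]
        congr 1
        rw [if_pos hbit]
        push_cast; ring
      · have hacc : ((b * 2 ^ (m :: rest).length : Nat) : Int) =
            (((2 * b) * 2 ^ rest.length : Nat) : Int) := by
          congr 1; simp [List.length_cons]; ring
        rw [if_neg hbit, hacc, harr, ih (i + 1) (2 * b)]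
        congr 1
        rw [if_neg hbit]
        push_cast; ring

-- parsing the rendered digit string is the same fold as the MSB-first accumulation
theorem pvParseMap (integer : Int) (l : List Int) : ∀ acc : Int,
    (l.map (fun bitmask => if PySem.Int.band integer bitmask ≠ 0 then '1' else '0')).foldl
        (fun acc c => 2 * acc + (if c = '1' then 1 else 0)) acc =
      l.foldl (fun result bitmask =>
        2 * result + (if PySem.Int.band integer bitmask ≠ 0 then 1 else 0)) acc := by
  induction l with
  | nil => intro acc; rfl
  | cons m rest ih =>
      intro acc
      by_cases hbit : PySem.Int.band integer m ≠ 0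
      · simp only [List.map_cons, List.foldl_cons, if_pos hbit, ih]
        rfl
      · simp only [List.map_cons, List.foldl_cons, if_neg hbit, ih]
        rfl

-- ===== VERDICT (by name: the statement is the Claim_ definition above) =====
theorem reorder_integer_spec : Claim_equal_reorder_integer := by
  intro integer ordering num_bits _
  unfold Spec_reorder_integer reorder_integer reorder_integer_alt pvIntOfBin
  have ha := pvLoop integer ordering 0 0
  simp only [Nat.zero_add, Nat.zero_mul, Nat.cast_zero] at ha
  rw [ha, List.foldl_cons, ← pvParseMap integer ordering]
  rfl
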